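-- pv_equiv track=rewrite | github.com/HaloKim/self_study | 1d1c/프로그래머스/# 부족한금액계산하기.py | solution
-- ===== SOURCE A (Python) =====
-- def solution(price, money, count):
--     answer = 0
--     for i in range(1, count+1):
--         answer += price*i
--     answer = money - answer
--     if answer >=0:
--         return 0
--     return -answer
-- ===== SOURCE B (Python) =====
-- def solution(price, money, count):
--     n = count if count > 0 else 0
--     total = price * n * (n + 1) // 2
--     shortfall = total - money
--     return shortfall if shortfall > 0 else 0
-- ===== Notes on version B (the rewrite author's own statement) =====
-- stated objective: faster
-- what changed: Replaced the O(count) summation loop with the closed-form arithmetic series price*n*(n+1)//2 and a max-with-zero.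
import Mathlib
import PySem

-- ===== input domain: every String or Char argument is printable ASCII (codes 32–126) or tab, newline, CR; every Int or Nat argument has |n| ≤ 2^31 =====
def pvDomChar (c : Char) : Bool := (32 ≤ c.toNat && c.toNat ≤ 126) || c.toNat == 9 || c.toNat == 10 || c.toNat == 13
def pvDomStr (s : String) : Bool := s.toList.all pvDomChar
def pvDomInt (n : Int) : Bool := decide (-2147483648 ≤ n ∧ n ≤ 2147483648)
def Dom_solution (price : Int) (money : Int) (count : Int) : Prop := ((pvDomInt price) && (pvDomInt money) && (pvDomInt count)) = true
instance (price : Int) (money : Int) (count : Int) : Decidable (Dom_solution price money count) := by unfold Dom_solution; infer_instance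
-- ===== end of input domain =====

-- B replaces A's O(count) summation loop with the closed-form series price*n*(n+1)//2 (asymptotically faster).


-- ===== PORT A =====
def solution (price : Int) (money : Int) (count : Int) : Int :=
  let answer : Int := (PySem.List.pyRange 1 (count + 1) 1).foldl (fun answer i => answer + price * i) 0
  let answer := money - answer
  if answer ≥ 0 then 0 else -answer

-- ===== PORT B =====
def solution_alt (price : Int) (money : Int) (count : Int) : Int :=
  let n : Int := if count > 0 then count else 0
  let total : Int := PySem.Int.floordiv (price * n * (n + 1)) 2
  let shortfall := total - money
  if shortfall > 0 then shortfall else 0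

-- ===== PRECONDITION & SPEC =====
def Spec_solution (price : Int) (money : Int) (count : Int) (out : Int) : Prop := out = solution_alt price money count
instance (price : Int) (money : Int) (count : Int) (out : Int) : Decidable (Spec_solution price money count out) := by unfold Spec_solution; infer_instance

-- ===== CLAIM (what is proved, stated in full; the proofs are below) =====
def Claim_equal_solution : Prop := ∀ (price : Int) (money : Int) (count : Int), Dom_solution price money count → Spec_solution price money count (solution price money count)

-- ===== LEMMAS AND PROOFS =====

-- triangular number as an Int-valued recursion on Nat
def pvTri : Nat → Int
  | 0 => 0
  | k + 1 => pvTri k + (k + 1)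

theorem pvTri_double (k : Nat) : 2 * pvTri k = (k : Int) * (k + 1) := by
  induction k with
  | zero => simp [pvTri]
  | succ k ih => simp [pvTri]; push_cast at ih ⊢; ring_nf at ih ⊢; omega

theorem pv_foldl_sum (price : Int) (k : Nat) (acc : Int) :
    (PySem.List.pyRange 1 ((k : Int) + 1) 1).foldl (fun answer i => answer + price * i) acc
      = acc + price * pvTri k := by
  induction k generalizing acc with
  | zero =>
      rw [PySem.List.pyRange_one_eq_nil (by norm_num)]
      simp [pvTri]
  | succ k ih =>
      have h : (1 : Int) ≤ (k : Int) + 1 := by omega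
      have : ((k + 1 : Nat) : Int) + 1 = ((k : Int) + 1) + 1 := by push_cast; ring
      rw [this, PySem.List.pyRange_one_succ_right h, List.foldl_append, ih]
      simp [pvTri]
      ring

theorem pv_floordiv_tri (price : Int) (k : Nat) :
    PySem.Int.floordiv (price * (k : Int) * ((k : Int) + 1)) 2 = price * pvTri k := by
  have h : price * (k : Int) * ((k : Int) + 1) = 2 * (price * pvTri k) := by
    linear_combination (-price) * pvTri_double k
  rw [h]
  simp [PySem.Int.floordiv]

-- ===== VERDICT (by name: the statement is the Claim_ definition above) =====
theorem solution_spec : Claim_equal_solution := by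
  intro price money count _
  unfold Spec_solution solution solution_alt
  by_cases hc : count > 0
  · have hk : count = ((count.toNat : Nat) : Int) := by omega
    simp only [if_pos hc]
    rw [hk, pv_foldl_sum price count.toNat 0, pv_floordiv_tri price count.toNat]
    simp only [zero_add]
    split_ifs with h1 h2 h2 <;> omega
  · have hnil : PySem.List.pyRange 1 (count + 1) 1 = [] :=
      PySem.List.pyRange_one_eq_nil (by omega)
    simp only [if_neg hc, hnil, List.foldl_nil]
    simp [PySem.Int.floordiv]
    split_ifs <;> omega
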